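-- pv_equiv track=rewrite | github.com/oraios/serena | src/solidlsp/language_servers/nim_language_server.py | _find_nim_body_end
-- ===== SOURCE A (Python) =====
-- def _find_nim_body_end(lines: list[str], start_line: int, upper_bound: int) -> int:
--     """Find the last line of a Nim symbol's body using indentation analysis.
--
--     Starting from the declaration line, scans forward to find all contiguous lines
--     that are more indented than the declaration. Empty lines within the body are
--     included. The scan stops at the first non-empty line with indentation <= the
--     declaration line, or at ``upper_bound``.
--
--     :param lines: all lines of the source file.
--     :param start_line: 0-indexed line number of the symbol declaration.
--     :param upper_bound: maximum line index (inclusive) to scan.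
--     :return: 0-indexed line number of the last body line.
--     """
--     if start_line >= len(lines):
--         return start_line
--
--     base_line = lines[start_line]
--     base_indent = len(base_line) - len(base_line.lstrip())
--     last_content_line = start_line
--
--     for line_idx in range(start_line + 1, min(upper_bound + 1, len(lines))):
--         line = lines[line_idx]
--         stripped = line.strip()
--
--         if not stripped:
--             # Empty line — might be inside the body; continue looking
--             continue
--
--         line_indent = len(line) - len(line.lstrip())
--         if line_indent <= base_indent:
--             # Reached a line at the same or lower indent — body ends
--             break
--
--         last_content_line = line_idx
--
--     return last_content_line
-- ===== SOURCE B (Python) =====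
-- def _find_nim_body_end(lines: list[str], start_line: int, upper_bound: int) -> int:
--     """Two-pass version: find the boundary first, then the last non-empty line before it."""
--     if start_line >= len(lines):
--         return start_line
--
--     base_line = lines[start_line]
--     base_indent = len(base_line) - len(base_line.lstrip())
--     limit = min(upper_bound + 1, len(lines))
--
--     boundary = limit
--     for i in range(start_line + 1, limit):
--         line = lines[i]
--         if line.strip() and len(line) - len(line.lstrip()) <= base_indent:
--             boundary = i
--             break
--
--     for i in range(boundary - 1, start_line, -1):
--         if lines[i].strip():
--             return i
--     return start_line
-- ===== Notes on version B (the rewrite author's own statement) =====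
-- stated objective: alternative
-- what changed: Replaces A's single forward pass that maintains a last_content_line accumulator with two accumulator-free scans: a forward scan that only locates the body's boundary line, then a backward scan from the boundary that returns the first non-empty line.
import Mathlib
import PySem

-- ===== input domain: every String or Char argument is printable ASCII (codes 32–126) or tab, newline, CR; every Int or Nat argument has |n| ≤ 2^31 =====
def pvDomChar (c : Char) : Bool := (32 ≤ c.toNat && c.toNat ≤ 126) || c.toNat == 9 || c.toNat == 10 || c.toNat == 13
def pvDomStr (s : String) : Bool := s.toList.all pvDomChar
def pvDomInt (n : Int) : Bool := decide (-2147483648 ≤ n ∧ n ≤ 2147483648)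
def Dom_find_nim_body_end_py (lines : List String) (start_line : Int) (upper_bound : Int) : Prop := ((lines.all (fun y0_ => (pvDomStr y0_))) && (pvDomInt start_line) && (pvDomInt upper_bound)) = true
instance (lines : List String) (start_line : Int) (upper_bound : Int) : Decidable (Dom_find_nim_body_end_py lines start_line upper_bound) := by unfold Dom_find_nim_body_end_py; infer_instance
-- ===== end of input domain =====

-- B replaces A's single forward pass with an accumulator by two accumulator-free scans
-- (forward to the boundary, then backward to the last non-empty line); alternative, not faster.

-- ===== PORT A =====
-- A's for-loop with `continue`/`break` and the last_content_line accumulator.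
def pvA_loop (lines : List String) (base_indent : Int) : List Int → Int → Int
  | [], last => last
  | i :: rest, last =>
    let line := (PySem.List.pyGet? lines i).getD ""
    let stripped := PySem.Str.strip line
    if stripped = "" then pvA_loop lines base_indent rest last
    else
      let line_indent := PySem.Str.len line - PySem.Str.len (PySem.Str.lstrip line)
      if line_indent ≤ base_indent then last
      else pvA_loop lines base_indent rest i

def find_nim_body_end_py (lines : List String) (start_line : Int) (upper_bound : Int) : Int :=
  if start_line ≥ (lines.length : Int) then start_line
  else
    let base_line := (PySem.List.pyGet? lines start_line).getD ""
    let base_indent := PySem.Str.len base_line - PySem.Str.len (PySem.Str.lstrip base_line)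
    pvA_loop lines base_indent
      (PySem.List.pyRange (start_line + 1) (min (upper_bound + 1) (lines.length : Int)) 1)
      start_line

-- ===== PORT B =====
-- forward scan: first index whose line is non-empty with indentation ≤ base_indent, else limit
def pvB_fwd (lines : List String) (base_indent : Int) (limit : Int) : List Int → Int
  | [] => limit
  | i :: rest =>
    let line := (PySem.List.pyGet? lines i).getD ""
    if PySem.Str.strip line ≠ "" ∧
        PySem.Str.len line - PySem.Str.len (PySem.Str.lstrip line) ≤ base_indent
    then i
    else pvB_fwd lines base_indent limit rest

-- backward scan: first index whose line is non-empty, else start_line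
def pvB_bwd (lines : List String) (start_line : Int) : List Int → Int
  | [] => start_line
  | i :: rest =>
    if PySem.Str.strip ((PySem.List.pyGet? lines i).getD "") ≠ "" then i
    else pvB_bwd lines start_line rest

def find_nim_body_end_py_alt (lines : List String) (start_line : Int) (upper_bound : Int) : Int :=
  if start_line ≥ (lines.length : Int) then start_line
  else
    let base_line := (PySem.List.pyGet? lines start_line).getD ""
    let base_indent := PySem.Str.len base_line - PySem.Str.len (PySem.Str.lstrip base_line)
    let limit := min (upper_bound + 1) (lines.length : Int)
    let boundary := pvB_fwd lines base_indent limit (PySem.List.pyRange (start_line + 1) limit 1)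
    pvB_bwd lines start_line (PySem.List.pyRange (boundary - 1) start_line (-1))

-- ===== PRECONDITION & SPEC =====
-- Pre_ excludes exactly the inputs where Python A raises IndexError on lines[start_line]
-- (start_line < -len(lines)); B raises there too.
def Pre_find_nim_body_end_py (lines : List String) (start_line : Int) (upper_bound : Int) : Prop :=
  -(lines.length : Int) ≤ start_line
instance (lines : List String) (start_line : Int) (upper_bound : Int) : Decidable (Pre_find_nim_body_end_py lines start_line upper_bound) := by unfold Pre_find_nim_body_end_py; infer_instance

def pvWitness_find_nim_body_end_py : List String × Int × Int := (["def f:", "  x"], 0, 5)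

def Spec_find_nim_body_end_py (lines : List String) (start_line : Int) (upper_bound : Int) (out : Int) : Prop := out = find_nim_body_end_py_alt lines start_line upper_bound
instance (lines : List String) (start_line : Int) (upper_bound : Int) (out : Int) : Decidable (Spec_find_nim_body_end_py lines start_line upper_bound out) := by unfold Spec_find_nim_body_end_py; infer_instance

-- ===== CLAIM (what is proved, stated in full; the proofs are below) =====
def Claim_equal_find_nim_body_end_py : Prop := ∀ (lines : List String) (start_line : Int) (upper_bound : Int), Dom_find_nim_body_end_py lines start_line upper_bound → Pre_find_nim_body_end_py lines start_line upper_bound → Spec_find_nim_body_end_py lines start_line upper_bound (find_nim_body_end_py lines start_line upper_bound)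

-- ===== LEMMAS AND PROOFS =====

-- bwd over an appended list: scan the first part, with the scan of the second as fallback
theorem pvB_bwd_append (lines : List String) (d : Int) (l l' : List Int) :
    pvB_bwd lines d (l ++ l') = pvB_bwd lines (pvB_bwd lines d l') l := by
  induction l with
  | nil => rfl
  | cons i rest ih => simp only [List.cons_append, pvB_bwd]; split <;> simp [ih]

-- fwd returns either limit or a member of its list
theorem pvB_fwd_ge (lines : List String) (bi : Int) (m c : Int) (l : List Int)
    (hm : c ≤ m) (hl : ∀ x ∈ l, c ≤ x) : c ≤ pvB_fwd lines bi m l := by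
  induction l with
  | nil => exact hm
  | cons i rest ih =>
    simp only [pvB_fwd]
    split
    · exact hl i (by simp)
    · exact ih (fun x hx => hl x (by simp [hx]))

theorem pv_main (lines : List String) (bi : Int) :
    ∀ (n : Nat) (a last m : Int), (m - a).toNat = n →
      pvA_loop lines bi (PySem.List.pyRange a m 1) last =
      pvB_bwd lines last
        (PySem.List.pyRange (pvB_fwd lines bi m (PySem.List.pyRange a m 1) - 1) (a - 1) (-1)) := by
  intro n
  induction n with
  | zero =>
    intro a last m h
    have hma : m ≤ a := by omega
    rw [PySem.List.pyRange_one_eq_nil hma]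
    simp only [pvA_loop, pvB_fwd]
    rw [PySem.List.pyRange_neg_one_eq_nil (by omega)]
    rfl
  | succ n ih =>
    intro a last m h
    have ham : a < m := by omega
    rw [PySem.List.pyRange_one_cons ham]
    have hb : a + 1 ≤ pvB_fwd lines bi m (PySem.List.pyRange (a + 1) m 1) := by
      refine pvB_fwd_ge lines bi m (a + 1) _ (by omega) ?_
      intro x hx
      exact ((PySem.List.mem_pyRange_one).1 hx).1
    -- the split of the descending range used in the skip cases
    have hsplit : ∀ b : Int, a + 1 ≤ b →
        PySem.List.pyRange (b - 1) (a - 1) (-1) =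
        PySem.List.pyRange (b - 1) a (-1) ++ [a] := by
      intro b hab
      rw [PySem.List.pyRange_neg_one_eq_reverse, PySem.List.pyRange_neg_one_eq_reverse]
      rw [show a - 1 + 1 = a from by ring, show b - 1 + 1 = b from by ring,
        PySem.List.pyRange_one_cons (by omega)]
      simp
    simp only [pvA_loop, pvB_fwd]
    by_cases hs : PySem.Str.strip ((PySem.List.pyGet? lines a).getD "") = ""
    · -- empty line: both scans skip it
      rw [if_pos hs, if_neg (fun hc => hc.1 hs), hsplit _ hb, pvB_bwd_append]
      have hone : pvB_bwd lines last [a] = last := by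
        simp [pvB_bwd, hs]
      rw [hone]
      have h' := ih (a + 1) last m (by omega)
      rw [show a + 1 - 1 = a from by ring] at h'
      exact h'
    · by_cases hi : PySem.Str.len ((PySem.List.pyGet? lines a).getD "") -
          PySem.Str.len (PySem.Str.lstrip ((PySem.List.pyGet? lines a).getD "")) ≤ bi
      · -- boundary line: A breaks, B's fwd stops at a; descending range is empty
        rw [if_neg hs, if_pos hi, if_pos ⟨hs, hi⟩,
          PySem.List.pyRange_neg_one_eq_nil (by omega)]
        rfl
      · -- body line: A records it, B's bwd falls back to it
        rw [if_neg hs, if_neg hi, if_neg (fun hc => hi hc.2), hsplit _ hb, pvB_bwd_append]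
        have hone : pvB_bwd lines last [a] = a := by
          simp [pvB_bwd, hs]
        rw [hone]
        have h' := ih (a + 1) a m (by omega)
        rw [show a + 1 - 1 = a from by ring] at h'
        exact h'

-- ===== VERDICT (by name: the statement is the Claim_ definition above) =====
theorem find_nim_body_end_py_spec : Claim_equal_find_nim_body_end_py := by
  intro lines start_line upper_bound _ _
  unfold Spec_find_nim_body_end_py find_nim_body_end_py find_nim_body_end_py_alt
  by_cases h : start_line ≥ (lines.length : Int)
  · simp [h]
  · simp only [h, if_false]
    have := pv_main lines
      (PySem.Str.len ((PySem.List.pyGet? lines start_line).getD "") -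
        PySem.Str.len (PySem.Str.lstrip ((PySem.List.pyGet? lines start_line).getD "")))
      ((min (upper_bound + 1) (lines.length : Int)) - (start_line + 1)).toNat
      (start_line + 1) start_line (min (upper_bound + 1) (lines.length : Int)) rfl
    simpa using this
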